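-- pv_equiv track=rewrite | github.com/pypi-data/pypi-mirror-390 | packages/gxl-ai-utils/gxl_ai_utils-1.6.1-py3-none-any.whl/gxl_ai_utils/utils/utils_file.py | do_split_dict
-- ===== SOURCE A (Python) =====
-- def do_split_dict(original_dict, num_subsets):
--     """
--     将字典尽量平均地切成 num_subsets 份，前 r 份多 1 个键。
--     返回一个由子字典组成的列表。
--     """
--     if num_subsets <= 0:
--         raise ValueError("num_subsets must be positive")
--
--     n = len(original_dict)
--     q, r = divmod(n, num_subsets)   # q: 基础块大小；r: 需要+1的块数
--
--     keys = list(original_dict.keys())  # 保持插入顺序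
--     subsets = []
--     start = 0
--     for i in range(num_subsets):
--         size = q + (1 if i < r else 0)
--         end = start + size
--         subset_keys = keys[start:end]
--         subset_dict = {k: original_dict[k] for k in subset_keys}
--         subsets.append(subset_dict)
--         start = end
--     return subsets
-- ===== SOURCE B (Python) =====
-- def do_split_dict(original_dict, num_subsets):
--     if num_subsets <= 0:
--         raise ValueError("num_subsets must be positive")
--     q, r = divmod(len(original_dict), num_subsets)
--     threshold = r * (q + 1)
--     subsets = [{} for _ in range(num_subsets)]
--     for p, (k, v) in enumerate(original_dict.items()):
--         idx = p // (q + 1) if p < threshold else r + (p - threshold) // q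
--         subsets[idx][k] = v
--     return subsets
-- ===== Notes on version B (the rewrite author's own statement) =====
-- stated objective: faster
-- what changed: Instead of a per-subset loop that slices the key list and rebuilds each sub-dict by key lookup, B pre-creates the subsets and makes one pass over the items, routing each item to its subset by a closed-form index; the per-subset slicing and the per-key dict lookups disappear.
import Mathlib
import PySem

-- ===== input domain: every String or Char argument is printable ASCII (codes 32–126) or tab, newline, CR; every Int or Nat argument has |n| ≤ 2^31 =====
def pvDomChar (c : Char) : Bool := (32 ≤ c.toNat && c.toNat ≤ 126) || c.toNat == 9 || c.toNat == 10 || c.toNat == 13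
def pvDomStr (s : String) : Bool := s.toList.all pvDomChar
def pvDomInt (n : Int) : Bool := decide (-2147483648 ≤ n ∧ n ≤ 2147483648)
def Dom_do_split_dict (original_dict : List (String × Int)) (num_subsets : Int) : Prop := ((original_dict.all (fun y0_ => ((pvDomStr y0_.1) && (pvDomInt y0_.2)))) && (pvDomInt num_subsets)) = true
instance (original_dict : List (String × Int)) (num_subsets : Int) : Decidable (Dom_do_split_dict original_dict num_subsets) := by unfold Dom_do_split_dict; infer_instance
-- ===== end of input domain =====

-- B replaces A's per-subset slice-and-rebuild loop by one pass over the items that routes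
-- each item to its subset by a closed-form index (objective: faster, measured).

-- ===== PORT A =====
-- original_dict[k]: first-match association-list lookup (k is always a present key here,
-- so the .getD 0 default is never reached on the admitted inputs)
def pvLookup (xs : List (String × Int)) (k : String) : Int :=
  ((xs.find? (fun p => p.1 == k)).map Prod.snd).getD 0

-- the body of A's for-loop (state = (subsets, start), loop variable i)
def pvStepA (original_dict : List (String × Int)) (keys : List String) (q r : Int)
    (st : List (List (String × Int)) × Int) (i : Int) :
    List (List (String × Int)) × Int :=
  let size : Int := q + (if i < r then 1 else 0)
  let e : Int := st.2 + size
  let subset_keys := PySem.List.slice keys (some st.2) (some e)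
  let subset_dict := subset_keys.map (fun k => (k, pvLookup original_dict k))
  (st.1 ++ [subset_dict], e)

-- literal port of A; Python raises ValueError for num_subsets ≤ 0 (excluded by Pre_), we return []
def do_split_dict (original_dict : List (String × Int)) (num_subsets : Int) : List (List (String × Int)) :=
  if num_subsets ≤ 0 then [] else
  let n : Int := (original_dict.length : Int)
  let q : Int := PySem.Int.floordiv n num_subsets
  let r : Int := PySem.Int.mod n num_subsets
  let keys : List String := original_dict.map Prod.fst
  ((PySem.List.pyRange 0 num_subsets 1).foldl (pvStepA original_dict keys q r) ([], 0)).1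

-- ===== PORT B =====
-- subsets[idx][k] = v : dict assignment (overwrite the first match, else append)
def pvDinsert (d : List (String × Int)) (k : String) (v : Int) : List (String × Int) :=
  match d with
  | [] => [(k, v)]
  | (k', v') :: rest => if k' == k then (k, v) :: rest else (k', v') :: pvDinsert rest k v

-- the body of B's for-loop: route item pkv = (p, (k, v)) to subset idx
def pvStepB (q r threshold : Int) (subsets : List (List (String × Int)))
    (pkv : Int × (String × Int)) : List (List (String × Int)) :=
  let idx : Int := if pkv.1 < threshold then PySem.Int.floordiv pkv.1 (q + 1)
                   else r + PySem.Int.floordiv (pkv.1 - threshold) q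
  subsets.set idx.toNat (pvDinsert (subsets.getD idx.toNat []) pkv.2.1 pkv.2.2)

-- literal port of B (Source B); Python raises ValueError for num_subsets ≤ 0 (excluded by Pre_), we return []
def do_split_dict_alt (original_dict : List (String × Int)) (num_subsets : Int) : List (List (String × Int)) :=
  if num_subsets ≤ 0 then [] else
  let q : Int := PySem.Int.floordiv (original_dict.length : Int) num_subsets
  let r : Int := PySem.Int.mod (original_dict.length : Int) num_subsets
  let threshold : Int := r * (q + 1)
  let init : List (List (String × Int)) := List.replicate num_subsets.toNat []
  (PySem.List.enumerate original_dict 0).foldl (pvStepB q r threshold) init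

-- ===== PRECONDITION & SPEC =====
-- Pre_ excludes num_subsets ≤ 0 (A raises ValueError there) and association lists with
-- duplicate keys, which cannot arise from a Python dict argument.
def Pre_do_split_dict (original_dict : List (String × Int)) (num_subsets : Int) : Prop :=
  0 < num_subsets ∧ (original_dict.map Prod.fst).Nodup
instance (original_dict : List (String × Int)) (num_subsets : Int) : Decidable (Pre_do_split_dict original_dict num_subsets) := by unfold Pre_do_split_dict; infer_instance

def pvWitness_do_split_dict : (List (String × Int)) × Int := ([("a", 1), ("b", 2), ("c", 3)], 2)

def Spec_do_split_dict (original_dict : List (String × Int)) (num_subsets : Int) (out : List (List (String × Int))) : Prop := out = do_split_dict_alt original_dict num_subsets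
instance (original_dict : List (String × Int)) (num_subsets : Int) (out : List (List (String × Int))) : Decidable (Spec_do_split_dict original_dict num_subsets out) := by unfold Spec_do_split_dict; infer_instance

-- ===== CLAIM (what is proved, stated in full; the proofs are below) =====
def Claim_equal_do_split_dict : Prop := ∀ (original_dict : List (String × Int)) (num_subsets : Int), Dom_do_split_dict original_dict num_subsets → Pre_do_split_dict original_dict num_subsets → Spec_do_split_dict original_dict num_subsets (do_split_dict original_dict num_subsets)

-- ===== LEMMAS AND PROOFS =====

-- block boundaries: subset i holds positions [pvStart i, pvStart i + pvSz i)
def pvStart (q r i : Nat) : Nat := q * i + min i r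
def pvSz (q r i : Nat) : Nat := q + (if i < r then 1 else 0)
-- the bucket index B routes position t to
def pvIdx (q r t : Nat) : Nat := if t < r * (q+1) then t / (q+1) else r + (t - r * (q+1)) / q
-- contents of subset i after the first t items have been processed
def pvBucket (xs : List (String × Int)) (q r i t : Nat) : List (String × Int) :=
  ((xs.take t).drop (pvStart q r i)).take (pvSz q r i)

theorem pvStart_succ (q r i : Nat) : pvStart q r (i+1) = pvStart q r i + pvSz q r i := by
  simp only [pvStart, pvSz, Nat.mul_succ]; split_ifs <;> omega

theorem pvStart_mono (q r : Nat) {a b : Nat} (h : a ≤ b) : pvStart q r a ≤ pvStart q r b := by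
  have := Nat.mul_le_mul_left q h
  simp [pvStart]; omega

theorem pvIdx_spec (q r mn t : Nat) (hr : r < mn) (hn : t < q * mn + r) :
    pvIdx q r t < mn ∧ pvStart q r (pvIdx q r t) ≤ t ∧
      t < pvStart q r (pvIdx q r t) + pvSz q r (pvIdx q r t) := by
  unfold pvIdx
  by_cases h : t < r * (q+1)
  · rw [if_pos h]
    have hq1 : 0 < q + 1 := Nat.succ_pos q
    have hd : t / (q+1) < r := (Nat.div_lt_iff_lt_mul hq1).mpr (by omega)
    have h1 : (q+1) * (t/(q+1)) + t % (q+1) = t := Nat.div_add_mod t (q+1)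
    have h1' := h1
    rw [Nat.add_mul, Nat.one_mul] at h1'
    have h2 : t % (q+1) < q + 1 := Nat.mod_lt t hq1
    refine ⟨by omega, ?_, ?_⟩ <;>
    · simp only [pvStart, pvSz, if_pos hd]
      omega
  · rw [if_neg h]
    rcases Nat.eq_zero_or_pos q with hq0 | hq
    · subst hq0; omega
    set u := t - r * (q+1) with hu
    have hut : u + r * q + r = t := by have : r * (q+1) = r*q + r := by ring
                                       omega
    have h1 : q * (u/q) + u % q = u := Nat.div_add_mod u q
    have h2 : u % q < q := Nat.mod_lt u hq
    have hmnr : u < q * (mn - r) := by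
      have e : q * (mn - r) + q * r = q * mn := by
        rw [← Nat.mul_add]; congr 1; omega
      have hc : r * q = q * r := Nat.mul_comm r q
      omega
    have hdiv : u / q < mn - r := Nat.div_lt_of_lt_mul (by omega)
    have hstart : pvStart q r (r + u/q) = q * r + q * (u/q) + r := by
      unfold pvStart
      rw [Nat.mul_add, Nat.min_eq_right (Nat.le_add_right r (u/q))]
    have hsz : pvSz q r (r + u/q) = q := by simp [pvSz]
    rw [hstart, hsz]
    have : q * r = r * q := Nat.mul_comm q r
    refine ⟨by omega, by omega, by omega⟩

theorem pvBucket_stable {xs : List (String × Int)} {q r i t : Nat} (h : xs.length ≤ t) :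
    pvBucket xs q r i t = pvBucket xs q r i xs.length := by
  unfold pvBucket
  rw [List.take_of_length_le h, List.take_length]

theorem pvTake_succ {α : Type} {xs : List α} {t : Nat} (h : t < xs.length) :
    xs.take (t+1) = xs.take t ++ [xs[t]] := by
  rw [List.take_succ, List.getElem?_eq_getElem h]; rfl

theorem pvBucket_small {xs : List (String × Int)} {q r i t : Nat} (h : t ≤ pvStart q r i) :
    pvBucket xs q r i t = [] := by
  unfold pvBucket
  rw [List.drop_eq_nil_of_le (by simp; omega), List.take_nil]

theorem pvBucket_frozen {xs : List (String × Int)} {q r i t : Nat} (ht : t < xs.length)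
    (h : pvStart q r i + pvSz q r i ≤ t) :
    pvBucket xs q r i (t+1) = pvBucket xs q r i t := by
  unfold pvBucket
  rw [pvTake_succ ht, List.drop_append_of_le_length (by simp; omega),
      List.take_append_of_le_length (by simp; omega)]

theorem pvBucket_app {xs : List (String × Int)} {q r i t : Nat} (ht : t < xs.length)
    (h1 : pvStart q r i ≤ t) (h2 : t < pvStart q r i + pvSz q r i) :
    pvBucket xs q r i (t+1) = pvBucket xs q r i t ++ [xs[t]] := by
  unfold pvBucket
  rw [pvTake_succ ht, List.drop_append_of_le_length (by simp; omega), List.take_append]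
  have hlen : ((xs.take t).drop (pvStart q r i)).length = t - pvStart q r i := by
    simp; omega
  congr 1
  rw [hlen]
  apply List.take_of_length_le
  simp; omega

theorem pvSet_map_range {α : Type} (f : Nat → α) (mn i : Nat) (v : α) (h : i < mn) :
    ((List.range mn).map f).set i v = (List.range mn).map (fun j => if j = i then v else f j) := by
  apply List.ext_getElem (by simp)
  intro j hj1 hj2
  simp only [List.length_map, List.length_range] at hj1 hj2
  rcases eq_or_ne j i with rfl | hne
  · rw [List.getElem_set_self (by simpa using h)]
    simp
  · rw [List.getElem_set_ne (by omega)]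
    simp [hne]

theorem pvGetD_map_range {α : Type} (f : Nat → α) (mn i : Nat) (d : α) (h : i < mn) :
    ((List.range mn).map f).getD i d = f i := by
  rw [List.getD_eq_getElem _ _ (by simpa using h)]
  simp

theorem pvLookup_mem {xs : List (String × Int)} (h : (xs.map Prod.fst).Nodup)
    {p : String × Int} (hp : p ∈ xs) : pvLookup xs p.1 = p.2 := by
  induction xs with
  | nil => cases hp
  | cons a l ih =>
    simp only [List.map_cons, List.nodup_cons] at h
    rcases List.mem_cons.mp hp with rfl | hmem
    · simp [pvLookup]
    · by_cases he : a.1 = p.1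
      · exact absurd (he ▸ List.mem_map_of_mem hmem) h.1
      · have : (a.1 == p.1) = false := by simpa using he
        simp only [pvLookup, List.find?_cons, this]
        exact ih h.2 hmem

theorem pvDinsert_append {d : List (String × Int)} {k : String} {v : Int}
    (h : k ∉ d.map Prod.fst) : pvDinsert d k v = d ++ [(k, v)] := by
  induction d with
  | nil => rfl
  | cons a l ih =>
    simp only [List.map_cons, List.mem_cons] at h
    push_neg at h
    have : (a.1 == k) = false := by simpa using (Ne.symm h.1)
    simp only [pvDinsert, this]
    rw [ih h.2]
    rfl

theorem pvKey_not_in_take {xs : List (String × Int)} (h : (xs.map Prod.fst).Nodup)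
    {t : Nat} (ht : t < xs.length) : xs[t].1 ∉ (xs.take t).map Prod.fst := by
  intro hmem
  have hsplit : xs.map Prod.fst = (xs.take t).map Prod.fst ++ (xs.drop t).map Prod.fst := by
    rw [← List.map_append, List.take_append_drop]
  rw [hsplit] at h
  have hd : xs[t].1 ∈ (xs.drop t).map Prod.fst := by
    have hx : (xs.drop t)[0]'(by simp; omega) = xs[t] := by
      simp [List.getElem_drop]
    have : xs[t] ∈ xs.drop t := hx ▸ List.getElem_mem (by simp; omega)
    exact List.mem_map_of_mem this
  exact (List.disjoint_of_nodup_append h) hmem hd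

-- B's loop body takes the bucket family at time t to the bucket family at time t+1
theorem pvStepB_bucket {xs : List (String × Int)} {q r mn : Nat}
    (hr : r < mn) (hn : xs.length = q * mn + r) (hnd : (xs.map Prod.fst).Nodup)
    {t : Nat} (ht : t < xs.length) :
    pvStepB (q : Int) (r : Int) ((r : Int) * ((q : Int) + 1))
      ((List.range mn).map (fun i => pvBucket xs q r i t)) ((t : Int), xs[t])
    = (List.range mn).map (fun i => pvBucket xs q r i (t+1)) := by
  obtain ⟨hI1, hI2, hI3⟩ := pvIdx_spec q r mn t hr (by omega)
  have hidx : (if ((t : Int)) < (r : Int) * ((q : Int) + 1)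
      then PySem.Int.floordiv (t : Int) ((q : Int) + 1)
      else (r : Int) + PySem.Int.floordiv ((t : Int) - (r : Int) * ((q : Int) + 1)) (q : Int))
      = ((pvIdx q r t : Nat) : Int) := by
    unfold pvIdx
    by_cases hc : t < r * (q+1)
    · rw [if_pos (by exact_mod_cast hc), if_pos hc]
      have he : ((q : Int) + 1) = (((q+1 : Nat) : Int)) := by push_cast; ring
      rw [he, PySem.Int.floordiv_natCast]
    · rw [if_neg (by exact_mod_cast hc), if_neg hc]
      have he : ((t : Int) - (r : Int) * ((q : Int) + 1)) = (((t - r * (q+1) : Nat) : Int)) := by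
        rw [Nat.cast_sub (not_lt.mp hc)]; push_cast; ring
      rw [he, PySem.Int.floordiv_natCast]
      push_cast; ring
  simp only [pvStepB, hidx, Int.toNat_natCast]
  rw [pvGetD_map_range _ _ _ _ hI1]
  have hkey : xs[t].1 ∉ (pvBucket xs q r (pvIdx q r t) t).map Prod.fst := by
    intro hmem
    apply pvKey_not_in_take hnd ht
    rcases List.mem_map.mp hmem with ⟨p, hp, hpe⟩
    have : p ∈ xs.take t :=
      List.mem_of_mem_drop (List.mem_of_mem_take hp)
    exact hpe ▸ List.mem_map_of_mem this
  rw [pvDinsert_append hkey, pvSet_map_range _ _ _ _ hI1]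
  apply List.map_congr_left
  intro j hj
  have hjlt : j < mn := List.mem_range.mp hj
  by_cases hje : j = pvIdx q r t
  · subst hje
    rw [if_pos rfl, pvBucket_app ht hI2 hI3]
  · rw [if_neg hje]
    rcases Nat.lt_or_ge j (pvIdx q r t) with hlt | hge
    · have hfr : pvStart q r j + pvSz q r j ≤ t := by
        calc pvStart q r j + pvSz q r j = pvStart q r (j+1) := (pvStart_succ q r j).symm
        _ ≤ pvStart q r (pvIdx q r t) := pvStart_mono q r (by omega)
        _ ≤ t := hI2
      rw [pvBucket_frozen ht hfr]
    · have hgt : pvIdx q r t < j := by omega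
      have hsm : t + 1 ≤ pvStart q r j := by
        have : pvStart q r (pvIdx q r t + 1) ≤ pvStart q r j := pvStart_mono q r (by omega)
        rw [pvStart_succ] at this
        omega
      rw [pvBucket_small hsm, pvBucket_small (by omega)]

-- B's fold, from any position t, finishes the bucket family
theorem pvB_fold {xs : List (String × Int)} {q r mn : Nat}
    (hr : r < mn) (hn : xs.length = q * mn + r) (hnd : (xs.map Prod.fst).Nodup) :
    ∀ (ys : List (String × Int)) (t : Nat), xs.drop t = ys →
    (PySem.List.enumerate ys (t : Int)).foldl
        (pvStepB (q : Int) (r : Int) ((r : Int) * ((q : Int) + 1)))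
        ((List.range mn).map (fun i => pvBucket xs q r i t))
    = (List.range mn).map (fun i => pvBucket xs q r i xs.length) := by
  intro ys
  induction ys with
  | nil =>
    intro t hdrop
    have hlen : xs.length ≤ t := by
      have := congrArg List.length hdrop
      simp at this
      omega
    rw [PySem.List.enumerate_nil, List.foldl_nil]
    have : (fun i => pvBucket xs q r i t) = (fun i => pvBucket xs q r i xs.length) :=
      funext (fun i => pvBucket_stable hlen)
    rw [this]
  | cons y ys ih =>
    intro t hdrop
    have ht : t < xs.length := by
      have := congrArg List.length hdrop
      simp at this
      omega
    have hy : xs[t] = y := by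
      have h0 : (xs.drop t)[0]? = some y := by rw [hdrop]; rfl
      rw [List.getElem?_drop] at h0
      rw [List.getElem?_eq_getElem (by omega)] at h0
      have : xs[t + 0]'(by omega) = xs[t] := by congr 1
      rw [this] at h0
      exact Option.some.inj h0
    rw [PySem.List.enumerate_cons, List.foldl_cons, ← hy,
        pvStepB_bucket hr hn hnd ht]
    have hdrop' : xs.drop (t+1) = ys := by
      have : xs.drop (t+1) = (xs.drop t).drop 1 := by
        rw [List.drop_drop]
      rw [this, hdrop, List.drop_one, List.tail_cons]
    have := ih (t+1) hdrop'
    rw [← this, show ((t : Int) + 1) = (((t+1 : Nat)) : Int) by push_cast; ring]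

-- A's fold over range j builds the first j sub-dicts and leaves start at pvStart j
theorem pvA_fold (xs : List (String × Int)) (q r : Nat) (j : Nat) :
    (List.range j).foldl
        (fun st (k : Nat) => pvStepA xs (xs.map Prod.fst) (q : Int) (r : Int) st (k : Int))
        ([], 0)
    = ((List.range j).map (fun i =>
          (PySem.List.slice (xs.map Prod.fst) (some ((pvStart q r i : Nat) : Int))
              (some ((pvStart q r i + pvSz q r i : Nat) : Int))).map
            (fun k => (k, pvLookup xs k))),
       ((pvStart q r j : Nat) : Int)) := by
  induction j with
  | zero => simp [pvStart]
  | succ j ih =>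
    rw [List.range_succ, List.foldl_append, ih, List.foldl_cons, List.foldl_nil]
    simp only [pvStepA]
    have hsz : ((q : Int) + if (j : Int) < (r : Int) then 1 else 0) = ((pvSz q r j : Nat) : Int) := by
      unfold pvSz
      by_cases hc : j < r
      · rw [if_pos (by exact_mod_cast hc), if_pos hc]; push_cast; ring
      · rw [if_neg (by exact_mod_cast hc), if_neg hc]; push_cast; ring
    simp only [hsz]
    rw [Prod.mk.injEq]
    refine ⟨?_, ?_⟩
    · rw [List.map_append, List.map_cons, List.map_nil,
          show ((pvStart q r j : Nat) : Int) + ((pvSz q r j : Nat) : Int)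
             = (((pvStart q r j + pvSz q r j : Nat)) : Int) by push_cast; ring]
    · rw [pvStart_succ]
      push_cast
      ring

-- the sub-dict A builds for subset i is exactly the final bucket i
theorem pvGA_bucket {xs : List (String × Int)} (hnd : (xs.map Prod.fst).Nodup)
    (q r i : Nat) :
    (PySem.List.slice (xs.map Prod.fst) (some ((pvStart q r i : Nat) : Int))
        (some ((pvStart q r i + pvSz q r i : Nat) : Int))).map
      (fun k => (k, pvLookup xs k))
    = pvBucket xs q r i xs.length := by
  rw [PySem.List.slice_natCast, Nat.add_sub_cancel_left, ← List.map_drop, ← List.map_take,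
      List.map_map]
  unfold pvBucket
  rw [List.take_length]
  conv_rhs => rw [← List.map_id (List.take (pvSz q r i) (List.drop (pvStart q r i) xs))]
  apply List.map_congr_left
  intro p hp
  have hpx : p ∈ xs := List.mem_of_mem_drop (List.mem_of_mem_take hp)
  simp only [Function.comp, id]
  rw [pvLookup_mem hnd hpx]

-- ===== VERDICT (by name: the statement is the Claim_ definition above) =====
theorem do_split_dict_spec : Claim_equal_do_split_dict := by
  intro xs m _hDom hPre
  obtain ⟨hm, hnd⟩ := hPre
  unfold Spec_do_split_dict
  obtain ⟨mn, rfl⟩ : ∃ mn : Nat, m = (mn : Int) := ⟨m.toNat, (Int.toNat_of_nonneg hm.le).symm⟩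
  have hmn : 0 < mn := by exact_mod_cast hm
  have hr : xs.length % mn < mn := Nat.mod_lt _ hmn
  have hn : xs.length = (xs.length / mn) * mn + xs.length % mn := by
    have h1 := Nat.div_add_mod xs.length mn
    have h2 := Nat.mul_comm mn (xs.length / mn)
    omega
  simp only [do_split_dict, do_split_dict_alt]
  rw [if_neg (by omega), if_neg (by omega)]
  simp only [PySem.Int.floordiv_natCast, PySem.Int.mod_natCast, Int.toNat_natCast]
  -- B side: the initial subsets are the buckets at time 0
  have hinit : List.replicate mn ([] : List (String × Int))
      = (List.range mn).map (fun i => pvBucket xs (xs.length / mn) (xs.length % mn) i 0) := by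
    have h1 : (fun i => pvBucket xs (xs.length / mn) (xs.length % mn) i 0)
        = (fun _ : Nat => ([] : List (String × Int))) :=
      funext (fun i => pvBucket_small (Nat.zero_le _))
    rw [h1, List.map_const', List.length_range]
  rw [hinit]
  have hB := pvB_fold (xs := xs) hr hn hnd xs 0 (by simp)
  rw [Nat.cast_zero] at hB
  rw [hB]
  -- A side: the loop over range(num_subsets) builds the final buckets
  rw [PySem.List.pyRange_one]
  have hrange : ((mn : Int) - 0).toNat = mn := by omega
  rw [hrange]
  have hfun : (fun k : Nat => (0 : Int) + (k : Int)) = (fun k : Nat => (k : Int)) := by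
    funext k; ring
  rw [hfun]
  simp only [List.foldl_map]
  rw [pvA_fold xs (xs.length / mn) (xs.length % mn) mn]
  apply List.map_congr_left
  intro i _
  exact pvGA_bucket hnd (xs.length / mn) (xs.length % mn) i
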